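-- pv_equiv track=rewrite | github.com/anjli01/Python-Functions | 20.py | concatenate_matrix_columns
-- ===== SOURCE A (Python) =====
-- from typing import List, Dict, Any, Union, Iterable
--
-- def concatenate_matrix_columns(matrix: List[List[str]]) -> List[str]:
--     """
--     Performs vertical string concatenation on a matrix (list of lists).
--
--     Example: [["a", "b"], ["c", "d"]] -> ["ac", "bd"]
--     """
--     if not matrix:
--         return []
--
--     num_cols = max(len(row) for row in matrix)
--     result = []
--     for col_idx in range(num_cols):
--         column_str = ""
--         for row in matrix:
--             if col_idx < len(row):
--                 column_str += row[col_idx]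
--         result.append(column_str)
--     return result
-- ===== SOURCE B (Python) =====
-- def concatenate_matrix_columns(matrix):
--     """Single row-major pass: grow a list of per-column accumulators and
--     append each row's cells onto them; no max() pass, no column loop."""
--     result = []
--     for row in matrix:
--         if len(row) > len(result):
--             result.extend([''] * (len(row) - len(result)))
--         for j, s in enumerate(row):
--             result[j] += s
--     return result
-- ===== Notes on version B (the rewrite author's own statement) =====
-- stated objective: alternative
-- what changed: Instead of A's column-major nested scan (compute max row length, then for each column index rescan every row with a bounds check), B makes one row-major pass that grows a list of per-column string accumulators and appends each row's cells onto them; columns are built incrementally, neither max() nor a bounds check exists.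
import Mathlib
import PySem

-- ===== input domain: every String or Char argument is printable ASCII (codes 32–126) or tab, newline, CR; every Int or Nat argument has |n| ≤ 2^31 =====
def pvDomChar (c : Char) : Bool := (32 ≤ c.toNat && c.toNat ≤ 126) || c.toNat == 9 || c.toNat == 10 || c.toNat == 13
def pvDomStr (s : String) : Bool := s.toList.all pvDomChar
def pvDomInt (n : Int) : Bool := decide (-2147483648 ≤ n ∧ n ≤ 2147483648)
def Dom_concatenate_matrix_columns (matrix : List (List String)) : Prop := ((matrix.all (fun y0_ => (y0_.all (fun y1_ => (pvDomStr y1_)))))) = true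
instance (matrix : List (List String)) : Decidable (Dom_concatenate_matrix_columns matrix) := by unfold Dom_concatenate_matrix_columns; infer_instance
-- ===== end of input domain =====

-- B replaces A's column-major nested scan (max length, then rescan all rows per column
-- with a bounds check) by a single row-major pass growing per-column accumulators.


-- ===== PORT A =====
-- Python: max(len(row) for row in matrix) on a NONEMPTY matrix of Nat lengths equals
-- the fold of Nat.max from 0 (lengths are ≥ 0, Nat max has no tie issue).
-- row[col_idx] is guarded by col_idx < len(row), so List.getD is exact there.
def concatenate_matrix_columns (matrix : List (List String)) : List String :=
  if matrix = [] then []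
  else
    let num_cols := (matrix.map (fun row => row.length)).foldl Nat.max 0
    (List.range num_cols).foldl
      (fun result col_idx =>
        result ++ [matrix.foldl
          (fun column_str row =>
            if col_idx < row.length then column_str ++ row.getD col_idx "" else column_str)
          ""])
      []

-- ===== PORT B =====
-- One row step of B: "extend result with '' up to len(row); result[j] += row[j] for each j"
-- — i.e. walk result and row together, appending cells, keeping the leftover of either.
def pvRowAdd : List String → List String → List String
  | acc, [] => acc
  | [], s :: ss => ("" ++ s) :: pvRowAdd [] ss
  | a :: as, s :: ss => (a ++ s) :: pvRowAdd as ss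

-- the outer 'for row in matrix' loop over the accumulator 'result = []'
def concatenate_matrix_columns_alt (matrix : List (List String)) : List String :=
  matrix.foldl pvRowAdd []

-- ===== PRECONDITION & SPEC =====
def Spec_concatenate_matrix_columns (matrix : List (List String)) (out : List String) : Prop := out = concatenate_matrix_columns_alt matrix
instance (matrix : List (List String)) (out : List String) : Decidable (Spec_concatenate_matrix_columns matrix out) := by unfold Spec_concatenate_matrix_columns; infer_instance

-- ===== CLAIM (what is proved, stated in full; the proofs are below) =====
def Claim_equal_concatenate_matrix_columns : Prop := ∀ (matrix : List (List String)), Dom_concatenate_matrix_columns matrix → Spec_concatenate_matrix_columns matrix (concatenate_matrix_columns matrix)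

-- ===== LEMMAS AND PROOFS =====

theorem pvRowAdd_length (acc row : List String) :
    (pvRowAdd acc row).length = Nat.max acc.length row.length := by
  induction acc generalizing row with
  | nil =>
    induction row with
    | nil => rfl
    | cons s ss ih => simpa [pvRowAdd] using ih
  | cons a as ih =>
    cases row with
    | nil => simp [pvRowAdd]
    | cons s ss => simp [pvRowAdd, ih]

theorem pvRowAdd_getD (acc row : List String) (j : Nat) :
    (pvRowAdd acc row).getD j "" = acc.getD j "" ++ row.getD j "" := by
  induction acc generalizing row j with
  | nil =>
    induction row generalizing j with
    | nil => simp [pvRowAdd]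
    | cons s ss ih =>
      cases j with
      | zero => simp [pvRowAdd]
      | succ k => simpa [pvRowAdd] using ih k
  | cons a as ih =>
    cases row with
    | nil => simp [pvRowAdd]
    | cons s ss =>
      cases j with
      | zero => simp [pvRowAdd]
      | succ k => simpa [pvRowAdd] using ih ss k

theorem pv_foldl_rowAdd_length (rows : List (List String)) : ∀ acc : List String,
    (rows.foldl pvRowAdd acc).length = (rows.map (fun r => r.length)).foldl Nat.max acc.length := by
  induction rows with
  | nil => intro acc; rfl
  | cons r rs ih =>
    intro acc
    simp only [List.foldl_cons, List.map_cons]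
    rw [ih, pvRowAdd_length]

theorem pv_foldl_rowAdd_getD (rows : List (List String)) (j : Nat) : ∀ acc : List String,
    (rows.foldl pvRowAdd acc).getD j ""
      = rows.foldl (fun c r => c ++ r.getD j "") (acc.getD j "") := by
  induction rows with
  | nil => intro acc; rfl
  | cons r rs ih =>
    intro acc
    simp only [List.foldl_cons]
    rw [ih, pvRowAdd_getD]

-- folding with snoc builds the map
theorem pv_foldl_snoc {α β : Type} (g : α → β) (l : List α) : ∀ acc : List β,
    l.foldl (fun res x => res ++ [g x]) acc = acc ++ l.map g := by
  induction l with
  | nil => intro acc; simp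
  | cons x xs ih => intro acc; simp [ih]

-- A's guarded accumulation equals the unguarded one with default ""
theorem pv_col_guard (i : Nat) (rows : List (List String)) : ∀ acc : String,
    rows.foldl (fun column_str row =>
        if i < row.length then column_str ++ row.getD i "" else column_str) acc
      = rows.foldl (fun acc r => acc ++ r.getD i "") acc := by
  induction rows with
  | nil => intro acc; rfl
  | cons r rs ih =>
    intro acc
    simp only [List.foldl_cons]
    by_cases h : i < r.length
    · rw [if_pos h, ih]
    · rw [if_neg h, List.getD_eq_default _ _ (by omega), ih]
      simp

-- ===== VERDICT (by name: the statement is the Claim_ definition above) =====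
theorem concatenate_matrix_columns_spec : Claim_equal_concatenate_matrix_columns := by
  intro matrix _
  unfold Spec_concatenate_matrix_columns concatenate_matrix_columns concatenate_matrix_columns_alt
  by_cases hnil : matrix = []
  · subst hnil; simp
  · rw [if_neg hnil]
    show (List.range ((matrix.map (fun row => row.length)).foldl Nat.max 0)).foldl _ [] = _
    rw [pv_foldl_snoc]
    simp only [List.nil_append]
    have hlen : (matrix.foldl pvRowAdd []).length
        = (matrix.map (fun row => row.length)).foldl Nat.max 0 := by
      simpa using pv_foldl_rowAdd_length matrix []
    apply List.ext_getElem
    · simpa using hlen.symm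
    · intro i h1 h2
      have hi : i < (matrix.foldl pvRowAdd []).length := h2
      have := pv_foldl_rowAdd_getD matrix i []
      simp only [List.getD_nil] at this
      rw [List.getElem_map, List.getElem_range]
      rw [← List.getD_eq_getElem (matrix.foldl pvRowAdd []) "" hi, this]
      exact pv_col_guard i matrix ""
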